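-- pv_equiv track=rewrite | github.com/JCEOZ/bootdev-static-site-generator | src/block.py | __is_block_type_heading__
-- ===== SOURCE A (Python) =====
-- import itertools
--
-- def __is_block_type_heading__(block_type):
--     lines = block_type.split('\n')
--     if len(lines) != 1: return False
--     line = lines[0]
--     for i in range(1, 7):
--         prefix = "".join(itertools.repeat("#", i))
--         if line.startswith(f"{prefix} "):
--             return True
--     return False
-- ===== SOURCE B (Python) =====
-- def __is_block_type_heading__(block_type):
--     if '\n' in block_type:
--         return False
--     count = len(block_type) - len(block_type.lstrip('#'))
--     return 1 <= count <= 6 and count < len(block_type) and block_type[count] == ' '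
-- ===== Notes on version B (the rewrite author's own statement) =====
-- stated objective: simpler
-- what changed: Replaces the split-into-lines check and the loop that builds and tests six hash-prefix strings with a newline membership test plus a single count of leading hash characters validated arithmetically (1..6 hashes followed by a space).
import Mathlib
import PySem

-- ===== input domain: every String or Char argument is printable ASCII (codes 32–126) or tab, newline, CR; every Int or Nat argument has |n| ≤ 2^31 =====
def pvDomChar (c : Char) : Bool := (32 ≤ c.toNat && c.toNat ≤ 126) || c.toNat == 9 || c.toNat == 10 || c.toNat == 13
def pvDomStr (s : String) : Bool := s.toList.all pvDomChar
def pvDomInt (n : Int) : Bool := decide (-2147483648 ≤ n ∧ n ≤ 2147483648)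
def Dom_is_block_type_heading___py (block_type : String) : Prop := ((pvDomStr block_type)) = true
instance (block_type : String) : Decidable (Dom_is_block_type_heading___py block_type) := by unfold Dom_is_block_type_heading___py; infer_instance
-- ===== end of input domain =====

-- B replaces A's split-into-lines check and its six enumerated hash-prefix tests by a newline
-- membership test and one count of leading hash characters, validated arithmetically (simpler).

-- ===== PORT A =====
-- ported on the code-point list; PySem.Chars.* are the exact semantics of the str methods
def is_block_type_heading___py (block_type : String) : Bool :=
  let lines := PySem.Chars.splitOn block_type.toList ['\n']
  if lines.length ≠ 1 then false
  else
    let line := PySem.List.pyGetD lines 0 []   -- lines[0]; the guard ensures length 1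
    (PySem.List.pyRange 1 7 1).any fun i =>
      let pfx := PySem.Chars.join [] (List.replicate i.toNat ['#'])  -- "".join(itertools.repeat("#", i))
      PySem.Chars.startswith line (pfx ++ [' '])                     -- line.startswith(f"{prefix} ")

-- ===== PORT B =====
def is_block_type_heading___py_alt (block_type : String) : Bool :=
  let cs := block_type.toList
  if PySem.Chars.isIn ['\n'] cs then false
  else
    -- block_type.lstrip('#') drops exactly the leading '#' characters (exact)
    let count : Int := PySem.Chars.len cs - PySem.Chars.len (cs.dropWhile (· == '#'))
    decide (1 ≤ count) && decide (count ≤ 6) && decide (count < PySem.Chars.len cs) &&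
      (PySem.List.pyGet? cs count == some ' ')

-- ===== PRECONDITION & SPEC =====
def Spec_is_block_type_heading___py (block_type : String) (out : Bool) : Prop := out = is_block_type_heading___py_alt block_type
instance (block_type : String) (out : Bool) : Decidable (Spec_is_block_type_heading___py block_type out) := by unfold Spec_is_block_type_heading___py; infer_instance

-- ===== CLAIM (what is proved, stated in full; the proofs are below) =====
def Claim_equal_is_block_type_heading___py : Prop := ∀ (block_type : String), Dom_is_block_type_heading___py block_type → Spec_is_block_type_heading___py block_type (is_block_type_heading___py block_type)

-- ===== LEMMAS AND PROOFS =====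

-- splitOn.go with a never-matching single-char separator just copies the input
theorem pv_go_no_sep (fuel : Nat) : ∀ (l cur : List Char) (acc : List (List Char)), '\n' ∉ l → l.length ≤ fuel →
    PySem.Chars.splitOn.go ['\n'] fuel l cur acc = ((cur.reverse ++ l) :: acc).reverse := by
  induction fuel with
  | zero =>
    intro l cur acc _ hlen
    interval_cases hl : l.length
    · simp [List.length_eq_zero_iff.mp hl, PySem.Chars.splitOn.go]
  | succ f ih =>
    intro l cur acc hmem hlen
    cases l with
    | nil => simp [PySem.Chars.splitOn.go]
    | cons c rest =>
      have hc : c ≠ '\n' := fun h => hmem (h ▸ List.mem_cons_self)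
      have : (['\n'].isPrefixOf (c :: rest)) = false := by
        simp [List.isPrefixOf, Ne.symm hc]
      rw [PySem.Chars.splitOn.go, this]
      simp only [Bool.false_eq_true, if_false]
      rw [ih rest (c :: cur) acc (fun h => hmem (List.mem_cons_of_mem _ h)) (by simpa using Nat.lt_succ_iff.mp (by simpa using hlen))]
      simp

theorem pv_go_len_ge (fuel : Nat) : ∀ (l cur : List Char) (acc : List (List Char)),
    acc.length + 1 ≤ (PySem.Chars.splitOn.go ['\n'] fuel l cur acc).length := by
  induction fuel with
  | zero => intro l cur acc; simp [PySem.Chars.splitOn.go]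
  | succ f ih =>
    intro l cur acc
    cases l with
    | nil => simp [PySem.Chars.splitOn.go]
    | cons c rest =>
      rw [PySem.Chars.splitOn.go]
      by_cases h : (['\n'].isPrefixOf (c :: rest)) = true
      · rw [h]; simp only [if_true]
        have := ih (List.drop 1 (c :: rest)) [] ((cur.reverse) :: acc)
        simpa using this.trans' (by simp)
      · rw [Bool.eq_false_iff.mpr h]
        simp only [Bool.false_eq_true, if_false]
        exact ih rest (c :: cur) acc
  
theorem pv_go_sep_mem (fuel : Nat) : ∀ (l cur : List Char) (acc : List (List Char)), '\n' ∈ l → l.length ≤ fuel →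
    acc.length + 2 ≤ (PySem.Chars.splitOn.go ['\n'] fuel l cur acc).length := by
  induction fuel with
  | zero => intro l cur acc hmem hlen; simp at hlen; simp [hlen] at hmem
  | succ f ih =>
    intro l cur acc hmem hlen
    cases l with
    | nil => simp at hmem
    | cons c rest =>
      rw [PySem.Chars.splitOn.go]
      by_cases h : (['\n'].isPrefixOf (c :: rest)) = true
      · rw [h]; simp only [if_true]
        have := pv_go_len_ge f (List.drop 1 (c :: rest)) [] ((cur.reverse) :: acc)
        simpa using this
      · rw [Bool.eq_false_iff.mpr h]
        simp only [Bool.false_eq_true, if_false]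
        have hc : c ≠ '\n' := by
          intro hcEq; apply h; simp [List.isPrefixOf, hcEq]
        have hr : '\n' ∈ rest := by
          rcases List.mem_cons.mp hmem with h1 | h1
          · exact absurd h1.symm hc
          · exact h1
        exact ih rest (c :: cur) acc hr (by simpa using Nat.lt_succ_iff.mp (by simpa using hlen))

theorem pv_splitOn_no_nl (cs : List Char) (h : '\n' ∉ cs) :
    PySem.Chars.splitOn cs ['\n'] = [cs] := by
  unfold PySem.Chars.splitOn
  rw [pv_go_no_sep (cs.length + 1) cs [] [] h (by omega)]
  simp

theorem pv_splitOn_nl_len (cs : List Char) (h : '\n' ∈ cs) :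
    2 ≤ (PySem.Chars.splitOn cs ['\n']).length := by
  unfold PySem.Chars.splitOn
  simpa using pv_go_sep_mem (cs.length + 1) cs [] [] h (by omega)

-- the heading prefix test, characterised by the leading-'#' count
set_option maxRecDepth 8000 in
theorem pv_startswith_repl (i : Nat) : ∀ (cs : List Char),
    ((List.replicate i '#' ++ [' ']) <+: cs) ↔
      ((cs.takeWhile (· == '#')).length = i ∧ (cs.dropWhile (· == '#')).head? = some ' ') := by
  induction i with
  | zero =>
    intro cs
    cases cs with
    | nil => simp
    | cons c rest =>
      by_cases hc : c = '#'
      · subst hc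
        rw [List.takeWhile_cons]
        simp [List.cons_prefix_cons]
      · rw [List.takeWhile_cons, List.dropWhile_cons]
        simp [hc, List.cons_prefix_cons]
        exact eq_comm
  | succ j ih =>
    intro cs
    cases cs with
    | nil => simp [List.replicate_succ]
    | cons c rest =>
      by_cases hc : c = '#'
      · subst hc
        rw [List.takeWhile_cons, List.dropWhile_cons]
        simp only [List.replicate_succ, List.cons_append, List.cons_prefix_cons,
          beq_self_eq_true, if_true, List.length_cons, true_and]
        rw [ih rest]
        exact (and_congr_left' (by omega)).symm
      · rw [List.takeWhile_cons, List.dropWhile_cons]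
        simp [List.replicate_succ, List.cons_prefix_cons, hc, Ne.symm hc]

theorem pv_drop_head (cs : List Char) :
    cs[(cs.takeWhile (· == '#')).length]? = (cs.dropWhile (· == '#')).head? := by
  rw [show cs[(cs.takeWhile (· == '#')).length]?
        = (cs.takeWhile (· == '#') ++ cs.dropWhile (· == '#'))[(cs.takeWhile (· == '#')).length]?
      from by rw [List.takeWhile_append_dropWhile]]
  rw [List.getElem?_append_right (le_refl _)]
  simp [List.head?_eq_getElem?]

theorem pv_len_split (cs : List Char) :
    (cs.takeWhile (· == '#')).length + (cs.dropWhile (· == '#')).length = cs.length := by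
  conv_rhs => rw [← List.takeWhile_append_dropWhile (p := (· == '#')) (l := cs)]
  rw [List.length_append]

-- ===== VERDICT (by name: the statement is the Claim_ definition above) =====
theorem is_block_type_heading___py_spec : Claim_equal_is_block_type_heading___py := by
  intro s _
  unfold Spec_is_block_type_heading___py
  unfold is_block_type_heading___py is_block_type_heading___py_alt
  set cs := s.toList with hcs
  by_cases hnl : '\n' ∈ cs
  · have h1 : PySem.Chars.isIn ['\n'] cs = true := by
      rw [PySem.Chars.isIn_iff_infix]
      obtain ⟨l1, l2, hsplit⟩ := List.append_of_mem hnl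
      exact ⟨l1, l2, by simp [hsplit]⟩
    have h2 := pv_splitOn_nl_len cs hnl
    simp only [h1, if_true]
    rw [if_pos (by omega)]
  · have h1 : PySem.Chars.isIn ['\n'] cs = false := by
      rw [← Bool.not_eq_true, PySem.Chars.isIn_iff_infix]
      intro hinf
      exact hnl (hinf.mem (by simp))
    have h2 := pv_splitOn_no_nl cs hnl
    simp only [h1, h2, Bool.false_eq_true, if_false, List.length_cons, List.length_nil]
    rw [if_neg (by simp)]
    set c : Nat := (cs.takeWhile (· == '#')).length with hc
    have hlen := pv_len_split cs
    have hget := pv_drop_head cs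
    have hcount : (PySem.Chars.len cs : Int) - PySem.Chars.len (cs.dropWhile (· == '#')) = (c : Int) := by
      simp only [PySem.Chars.len_eq]
      omega
    rw [Bool.eq_iff_iff]
    have hrange : PySem.List.pyRange 1 7 1 = [1, 2, 3, 4, 5, 6] := by decide
    rw [hrange]
    simp only [List.any_cons, List.any_nil, Bool.or_eq_true, Bool.and_eq_true,
      PySem.Chars.startswith_iff, PySem.List.pyGetD, PySem.List.pyGet?_zero,
      List.getElem?_cons_zero, Option.getD_some, hcount, decide_eq_true_eq, beq_iff_eq,
      Bool.or_false]
    have key : ∀ i : Nat, ((List.replicate i '#' ++ [' ']) <+: cs) ↔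
        (c = i ∧ (cs.dropWhile (· == '#')).head? = some ' ') := fun i => pv_startswith_repl i cs
    have e1 := key 1; have e2 := key 2; have e3 := key 3
    have e4 := key 4; have e5 := key 5; have e6 := key 6
    simp only [show PySem.Chars.join [] (List.replicate (1:Int).toNat ['#']) ++ [' '] = List.replicate 1 '#' ++ [' '] from by decide,
      show PySem.Chars.join [] (List.replicate (2:Int).toNat ['#']) ++ [' '] = List.replicate 2 '#' ++ [' '] from by decide,
      show PySem.Chars.join [] (List.replicate (3:Int).toNat ['#']) ++ [' '] = List.replicate 3 '#' ++ [' '] from by decide,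
      show PySem.Chars.join [] (List.replicate (4:Int).toNat ['#']) ++ [' '] = List.replicate 4 '#' ++ [' '] from by decide,
      show PySem.Chars.join [] (List.replicate (5:Int).toNat ['#']) ++ [' '] = List.replicate 5 '#' ++ [' '] from by decide,
      show PySem.Chars.join [] (List.replicate (6:Int).toNat ['#']) ++ [' '] = List.replicate 6 '#' ++ [' '] from by decide]
    rw [e1, e2, e3, e4, e5, e6]
    constructor
    · rintro (⟨hceq, hhd⟩ | ⟨hceq, hhd⟩ | ⟨hceq, hhd⟩ | ⟨hceq, hhd⟩ | ⟨hceq, hhd⟩ | ⟨hceq, hhd⟩) <;>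
      · have hne : (cs.dropWhile (· == '#')) ≠ [] := by
          intro h0; rw [h0] at hhd; simp at hhd
        have hlt : c < cs.length := by
          have := List.length_pos_of_ne_nil hne; omega
        refine ⟨⟨⟨by omega, by omega⟩, ?_⟩, ?_⟩
        · simp only [PySem.Chars.len_eq]; exact_mod_cast hlt
        · rw [PySem.List.pyGet?_eq_some_getElem cs (by positivity) (by exact_mod_cast hlt)]
          simp only [Int.toNat_natCast]
          rw [← List.getElem?_eq_getElem hlt, hc, hget]
          exact hhd
    · rintro ⟨⟨⟨h1', h6'⟩, hlt'⟩, hg⟩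
      have hc1 : 1 ≤ c := by exact_mod_cast h1'
      have hc6 : c ≤ 6 := by exact_mod_cast h6'
      have hlt : c < cs.length := by
        simp only [PySem.Chars.len_eq] at hlt'; exact_mod_cast hlt'
      rw [PySem.List.pyGet?_eq_some_getElem cs (by positivity) (by exact_mod_cast hlt)] at hg
      simp only [Int.toNat_natCast] at hg
      rw [← List.getElem?_eq_getElem hlt, hc, hget] at hg
      interval_cases c <;> simp [hg]
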